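-- pv_equiv track=rewrite | github.com/Hannaaaaaaa/2017A2CS | Ch25:/recursion1.py | strCopies
-- ===== SOURCE A (Python) =====
-- def strCopies(x,y,z):
--     w=len(y)
--     if z==0:
--         return 'True'
--     if x=='':
--         return 'False'
--
--     if x[-w:]==y:
--         return strCopies(x[:-w],y,z-1)
--     else:
--         return strCopies(x[:-1],y,z)
-- ===== SOURCE B (Python) =====
-- def strCopies(x, y, z):
--     # Iterative: scan from the right with an index pointer; no substring copies.
--     w = len(y)
--     i = len(x)
--     rem = z
--     while rem != 0:
--         if i == 0:
--             return 'False'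
--         if 0 < w <= i and x.startswith(y, i - w):
--             i -= w
--             rem -= 1
--         else:
--             i -= 1
--     return 'True'
-- ===== Notes on version B (the rewrite author's own statement) =====
-- stated objective: faster
-- what changed: Replaced A's recursion that copies a new suffix string at every step (x[:-w] / x[:-1]) with an iterative right-to-left scan over the original string using an index pointer and startswith, so no substrings are ever materialized.
import Mathlib
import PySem

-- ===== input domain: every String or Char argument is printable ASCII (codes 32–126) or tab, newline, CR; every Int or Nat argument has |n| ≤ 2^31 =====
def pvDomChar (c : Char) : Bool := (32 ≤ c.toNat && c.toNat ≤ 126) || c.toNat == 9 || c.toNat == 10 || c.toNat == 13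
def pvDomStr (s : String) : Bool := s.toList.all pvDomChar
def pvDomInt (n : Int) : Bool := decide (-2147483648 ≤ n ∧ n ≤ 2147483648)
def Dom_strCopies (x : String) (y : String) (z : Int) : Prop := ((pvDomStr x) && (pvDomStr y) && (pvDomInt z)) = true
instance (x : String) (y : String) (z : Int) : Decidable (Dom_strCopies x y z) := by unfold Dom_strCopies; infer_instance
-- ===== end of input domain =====

-- B re-implements A's greedy right-to-left scan with an index pointer instead of recursive slicing
-- (no substring copies); equivalence of return values is proved for all inputs.

-- ===== PORT A =====
-- termination helper for A's recursion (the sliced string is strictly shorter)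
theorem pvSliceToNegLen_lt (x : List Char) (hx : x ≠ []) (w : Nat) :
    (PySem.List.slice x none (some (-(w : Int)))).length < x.length := by
  rcases Nat.eq_zero_or_pos w with h | h
  · subst h
    have : (-(((0:Nat)) : Int)) = ((0:Nat) : Int) := by simp
    rw [this, PySem.List.slice_to_natCast]
    cases x with
    | nil => exact absurd rfl hx
    | cons a t => simp
  · rw [PySem.List.slice_to_neg_natCast x w h]
    cases x with
    | nil => exact absurd rfl hx
    | cons a t => simp [List.length_take]; omega

-- literal transliteration of A (recursion on the string as a char list)
def strCopiesA (x : List Char) (y : List Char) (z : Int) : String :=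
  let w : Nat := y.length
  if z = 0 then "True"
  else if x = [] then "False"
  else if PySem.List.slice x (some (-(w : Int))) none = y then
    strCopiesA (PySem.List.slice x none (some (-(w : Int)))) y (z - 1)
  else
    strCopiesA (PySem.List.slice x none (some (-1))) y z
termination_by x.length
decreasing_by
  · exact pvSliceToNegLen_lt x (by assumption) y.length
  · rw [PySem.List.slice_to_neg_one]
    cases x with
    | nil => exact absurd rfl (by assumption)
    | cons a t => simp

def strCopies (x : String) (y : String) (z : Int) : String :=
  strCopiesA x.toList y.toList z

-- ===== PORT B =====
-- the while-loop of Source B: i is the index pointer, rem the remaining copies;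
-- x.startswith(y, i-w) with 0 ≤ i-w and w ≤ i is exactly (x.drop (i-w)).take w = y
def strCopiesAltLoop (x : List Char) (y : List Char) (w : Nat) (i : Nat) (rem : Int) : String :=
  if rem = 0 then "True"
  else if i = 0 then "False"
  else if 0 < w ∧ w ≤ i ∧ (x.drop (i - w)).take w = y then
    strCopiesAltLoop x y w (i - w) (rem - 1)
  else
    strCopiesAltLoop x y w (i - 1) rem
termination_by i
decreasing_by
  · omega
  · omega

def strCopies_alt (x : String) (y : String) (z : Int) : String :=
  strCopiesAltLoop x.toList y.toList y.toList.length x.toList.length z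

-- ===== PRECONDITION & SPEC =====
def Spec_strCopies (x : String) (y : String) (z : Int) (out : String) : Prop := out = strCopies_alt x y z
instance (x : String) (y : String) (z : Int) (out : String) : Decidable (Spec_strCopies x y z out) := by unfold Spec_strCopies; infer_instance

-- ===== CLAIM (what is proved, stated in full; the proofs are below) =====
def Claim_equal_strCopies : Prop := ∀ (x : String) (y : String) (z : Int), Dom_strCopies x y z → Spec_strCopies x y z (strCopies x y z)

-- ===== LEMMAS AND PROOFS =====

theorem strCopiesAltLoop_eq (x y : List Char) (i : Nat) (hi : i ≤ x.length) (rem : Int) :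
    strCopiesAltLoop x y y.length i rem = strCopiesA (x.take i) y rem := by
  induction i using Nat.strong_induction_on generalizing rem with
  | _ i ih =>
    rw [strCopiesAltLoop, strCopiesA]
    by_cases hz : rem = 0
    · simp [hz]
    · simp only [hz, if_false]
      by_cases hi0 : i = 0
      · subst hi0; simp
      · have htlen : (x.take i).length = i := by
          rw [List.length_take]; omega
        have htne : x.take i ≠ [] := by
          intro h; rw [h] at htlen; simp at htlen; omega
        simp only [hi0, if_false, htne, if_false]
        set w := y.length with hw
        by_cases hwpos : 0 < w
        · by_cases hwi : w ≤ i
          · -- A's suffix test equals B's segment test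
            have hseg : PySem.List.slice (x.take i) (some (-(w : Int))) none
                = (x.drop (i - w)).take w := by
              rw [PySem.List.slice_from_neg_natCast _ w hwpos, htlen, List.drop_take]
              congr 1
              omega
            rw [hseg]
            by_cases hcond : (x.drop (i - w)).take w = y
            · simp only [hcond, if_true, hwpos, hwi, and_true, if_true]
              have : (x.take i).take ((x.take i).length - w) = x.take (i - w) := by
                rw [htlen, List.take_take]
                congr 1
                omega
              rw [PySem.List.slice_to_neg_natCast _ w hwpos, this]
              exact ih (i - w) (by omega) (by omega) _
            · simp only [hcond, if_false, and_false, if_false]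
              rw [PySem.List.slice_to_neg_one, List.dropLast_eq_take, htlen, List.take_take]
              have : min (i - 1) i = i - 1 := by omega
              rw [this]
              exact ih (i - 1) (by omega) (by omega) _
          · -- w > i : the suffix is all of x.take i, shorter than y, so no match on either side
            have hA : PySem.List.slice (x.take i) (some (-(w : Int))) none = x.take i := by
              rw [PySem.List.slice_from_neg_natCast _ w hwpos, htlen]
              have : i - w = 0 := by omega
              rw [this, List.drop_zero]
            have hAne : x.take i ≠ y := by
              intro h
              have := congrArg List.length h
              rw [htlen] at this
              omega
            rw [hA]
            simp only [hAne, if_false, hwi, false_and, and_false, if_false]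
            rw [PySem.List.slice_to_neg_one, List.dropLast_eq_take, htlen, List.take_take]
            have : min (i - 1) i = i - 1 := by omega
            rw [this]
            exact ih (i - 1) (by omega) (by omega) _
        · -- w = 0 : Python's x[-0:] is all of x, never equal to y = '' since x ≠ ''
          have hw0 : w = 0 := by omega
          have hy : y = [] := by rwa [← List.length_eq_zero_iff, ← hw]
          have hA : PySem.List.slice (x.take i) (some (-(w : Int))) none = x.take i := by
            rw [hw0]
            have h0 : (-(((0:Nat)) : Int)) = ((0:Nat) : Int) := by simp
            rw [h0, PySem.List.slice_from_natCast, List.drop_zero]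
          rw [hA]
          simp only [hy, htne, if_false, hwpos, false_and, if_false]
          rw [PySem.List.slice_to_neg_one, List.dropLast_eq_take, htlen, List.take_take]
          have : min (i - 1) i = i - 1 := by omega
          rw [this]
          have := ih (i - 1) (by omega) (by omega) rem
          rw [hy] at this
          exact this

-- ===== VERDICT (by name: the statement is the Claim_ definition above) =====
theorem strCopies_spec : Claim_equal_strCopies := by
  intro x y z _
  unfold Spec_strCopies strCopies strCopies_alt
  rw [strCopiesAltLoop_eq x.toList y.toList x.toList.length (le_refl _) z, List.take_length]
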